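-- pv_equiv track=rewrite | github.com/sskzakaria/SystemMonitor | agent/src/monitors/usb_devices_monitor.py | _categorize_devices
-- ===== SOURCE A (Python) =====
-- from typing import Dict, Any, List, Optional, Set, Tuple
--
-- def _categorize_devices(devices: List[Dict]) -> Dict[str, List[Dict]]:
--     categorized: Dict[str, List[Dict]] = {
--         'storage': [], 'input': [], 'audio': [],
--         'hubs': [], 'printers': [], 'other': []
--     }
--     for device in devices:
--         name    = device.get('name', '').lower()
--         desc    = device.get('description', '').lower()
--         pnp     = device.get('pnp_class', '').lower()
--         service = device.get('service', '').lower()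
--
--         if any(k in name or k in desc or k in pnp
--                for k in ('disk', 'storage', 'mass storage', 'flash', 'usbstor')):
--             categorized['storage'].append(device)
--         elif any(k in name or k in desc or k in pnp or k in service
--                  for k in ('keyboard', 'mouse', 'hid', 'input', 'pointing')):
--             categorized['input'].append(device)
--         elif any(k in name or k in desc or k in pnp
--                  for k in ('audio', 'sound', 'microphone', 'headset', 'speaker',
--                             'scarlett', 'focusrite')):
--             categorized['audio'].append(device)
--         elif 'hub' in name or 'hub' in desc or 'hub' in pnp:
--             categorized['hubs'].append(device)
--         elif 'print' in name or 'print' in desc or 'print' in pnp: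
--             categorized['printers'].append(device)
--         else:
--             categorized['other'].append(device)
--
--     return categorized
-- ===== SOURCE B (Python) =====
-- from typing import Dict, List
--
-- _RULES = [
--     ('storage', ('name', 'description', 'pnp_class'),
--      ('disk', 'storage', 'mass storage', 'flash', 'usbstor')),
--     ('input', ('name', 'description', 'pnp_class', 'service'),
--      ('keyboard', 'mouse', 'hid', 'input', 'pointing')),
--     ('audio', ('name', 'description', 'pnp_class'),
--      ('audio', 'sound', 'microphone', 'headset', 'speaker', 'scarlett', 'focusrite')),
--     ('hubs', ('name', 'description', 'pnp_class'), ('hub',)),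
--     ('printers', ('name', 'description', 'pnp_class'), ('print',)),
-- ]
--
-- def _classify(device: Dict) -> str:
--     for cat, fields, keywords in _RULES:
--         texts = [device.get(f, '').lower() for f in fields]
--         if any(k in t for k in keywords for t in texts):
--             return cat
--     return 'other'
--
-- def _categorize_devices(devices: List[Dict]) -> Dict[str, List[Dict]]:
--     return {cat: [d for d in devices if _classify(d) == cat]
--             for cat in ('storage', 'input', 'audio', 'hubs', 'printers', 'other')}
-- ===== Notes on version B (the rewrite author's own statement) =====
-- stated objective: simpler
-- what changed: Replaces the single-pass if/elif ladder that appends into a mutable dict with a table-driven classifier (ordered rule list of category/fields/keywords) plus a per-category comprehension that groups devices by their classification.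
import Mathlib
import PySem

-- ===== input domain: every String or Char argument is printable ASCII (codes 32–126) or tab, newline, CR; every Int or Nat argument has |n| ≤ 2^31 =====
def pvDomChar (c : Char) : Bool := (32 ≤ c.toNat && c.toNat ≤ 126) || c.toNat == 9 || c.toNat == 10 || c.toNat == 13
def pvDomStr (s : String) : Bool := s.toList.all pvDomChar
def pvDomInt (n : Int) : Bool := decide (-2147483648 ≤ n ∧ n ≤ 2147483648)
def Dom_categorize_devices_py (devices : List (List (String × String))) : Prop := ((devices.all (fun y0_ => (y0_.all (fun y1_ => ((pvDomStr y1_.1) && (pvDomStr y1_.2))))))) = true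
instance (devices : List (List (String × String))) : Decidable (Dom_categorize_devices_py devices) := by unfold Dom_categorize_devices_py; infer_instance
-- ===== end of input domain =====

-- B replaces A's if/elif ladder appending into a mutable dict by a table-driven
-- classifier plus per-category grouping comprehensions (objective: simpler).

-- ===== PORT A =====
-- A's keyword tests, named per branch (same conditions, same order as the Python).
def pvCond1 (name desc pnp : String) : Bool :=
  ["disk", "storage", "mass storage", "flash", "usbstor"].any
    (fun k => PySem.Str.isIn k name || PySem.Str.isIn k desc || PySem.Str.isIn k pnp)
def pvCond2 (name desc pnp service : String) : Bool :=
  ["keyboard", "mouse", "hid", "input", "pointing"].any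
    (fun k => PySem.Str.isIn k name || PySem.Str.isIn k desc || PySem.Str.isIn k pnp || PySem.Str.isIn k service)
def pvCond3 (name desc pnp : String) : Bool :=
  ["audio", "sound", "microphone", "headset", "speaker", "scarlett", "focusrite"].any
    (fun k => PySem.Str.isIn k name || PySem.Str.isIn k desc || PySem.Str.isIn k pnp)
def pvCond4 (name desc pnp : String) : Bool :=
  PySem.Str.isIn "hub" name || PySem.Str.isIn "hub" desc || PySem.Str.isIn "hub" pnp
def pvCond5 (name desc pnp : String) : Bool :=
  PySem.Str.isIn "print" name || PySem.Str.isIn "print" desc || PySem.Str.isIn "print" pnp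

def pvAStep (categorized : PySem.Dict String (List (List (String × String))))
    (device : List (String × String)) : PySem.Dict String (List (List (String × String))) :=
  let d : PySem.Dict String String := ⟨device⟩
  let name := PySem.Str.lower (d.getD "name" "")
  let desc := PySem.Str.lower (d.getD "description" "")
  let pnp := PySem.Str.lower (d.getD "pnp_class" "")
  let service := PySem.Str.lower (d.getD "service" "")
  if pvCond1 name desc pnp then categorized.modify "storage" [] (· ++ [device])
  else if pvCond2 name desc pnp service then categorized.modify "input" [] (· ++ [device])
  else if pvCond3 name desc pnp then categorized.modify "audio" [] (· ++ [device])
  else if pvCond4 name desc pnp then categorized.modify "hubs" [] (· ++ [device])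
  else if pvCond5 name desc pnp then categorized.modify "printers" [] (· ++ [device])
  else categorized.modify "other" [] (· ++ [device])

def categorize_devices_py (devices : List (List (String × String))) :
    List (String × List (List (String × String))) :=
  let categorized : PySem.Dict String (List (List (String × String))) :=
    PySem.Dict.ofList [("storage", []), ("input", []), ("audio", []),
                       ("hubs", []), ("printers", []), ("other", [])]
  (devices.foldl pvAStep categorized).items

-- ===== PORT B =====
-- the ordered rule table: (category, field keys, keywords)
def pvRules : List (String × List String × List String) :=
  [("storage", ["name", "description", "pnp_class"],
      ["disk", "storage", "mass storage", "flash", "usbstor"]),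
   ("input", ["name", "description", "pnp_class", "service"],
      ["keyboard", "mouse", "hid", "input", "pointing"]),
   ("audio", ["name", "description", "pnp_class"],
      ["audio", "sound", "microphone", "headset", "speaker", "scarlett", "focusrite"]),
   ("hubs", ["name", "description", "pnp_class"], ["hub"]),
   ("printers", ["name", "description", "pnp_class"], ["print"])]

-- first rule whose any-keyword-in-any-field test succeeds; 'other' if none
def pvClassifyGo (device : List (String × String))
    (rules : List (String × List String × List String)) : String :=
  match rules with
  | [] => "other"
  | (cat, fields, keywords) :: rest =>
    let texts := fields.map (fun f => PySem.Str.lower ((⟨device⟩ : PySem.Dict String String).getD f ""))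
    if keywords.any (fun k => texts.any (fun t => PySem.Str.isIn k t)) then cat
    else pvClassifyGo device rest

def pvClassify (device : List (String × String)) : String := pvClassifyGo device pvRules

def categorize_devices_py_alt (devices : List (List (String × String))) :
    List (String × List (List (String × String))) :=
  ["storage", "input", "audio", "hubs", "printers", "other"].map
    (fun cat => (cat, devices.filter (fun d => pvClassify d == cat)))

-- ===== PRECONDITION & SPEC =====
def Spec_categorize_devices_py (devices : List (List (String × String))) (out : List (String × List (List (String × String)))) : Prop := out = categorize_devices_py_alt devices
instance (devices : List (List (String × String))) (out : List (String × List (List (String × String)))) : Decidable (Spec_categorize_devices_py devices out) := by unfold Spec_categorize_devices_py; infer_instance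

-- ===== CLAIM (what is proved, stated in full; the proofs are below) =====
def Claim_equal_categorize_devices_py : Prop := ∀ (devices : List (List (String × String))), Dom_categorize_devices_py devices → Spec_categorize_devices_py devices (categorize_devices_py devices)

-- ===== LEMMAS AND PROOFS =====

-- B's classifier, written as the same nested if-ladder as A's step conditions
theorem pvClassify_eq (device : List (String × String)) :
    pvClassify device =
      (let d : PySem.Dict String String := ⟨device⟩
       let name := PySem.Str.lower (d.getD "name" "")
       let desc := PySem.Str.lower (d.getD "description" "")
       let pnp := PySem.Str.lower (d.getD "pnp_class" "")
       let service := PySem.Str.lower (d.getD "service" "")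
       if pvCond1 name desc pnp then "storage"
       else if pvCond2 name desc pnp service then "input"
       else if pvCond3 name desc pnp then "audio"
       else if pvCond4 name desc pnp then "hubs"
       else if pvCond5 name desc pnp then "printers"
       else "other") := by
  simp only [pvClassify, pvRules, pvClassifyGo, List.map, List.any,
    pvCond1, pvCond2, pvCond3, pvCond4, pvCond5, Bool.or_false, Bool.or_assoc]

-- the if/elif ladder on the six-entry dict, abstracted over the five tests
theorem pvLadder (b1 b2 b3 b4 b5 : Bool) (s i a h p o : List (List (String × String)))
    (d : List (String × String)) :
    (if b1 then (⟨[("storage", s), ("input", i), ("audio", a), ("hubs", h), ("printers", p), ("other", o)]⟩ : PySem.Dict String (List (List (String × String)))).modify "storage" [] (· ++ [d])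
     else if b2 then (⟨[("storage", s), ("input", i), ("audio", a), ("hubs", h), ("printers", p), ("other", o)]⟩ : PySem.Dict String (List (List (String × String)))).modify "input" [] (· ++ [d])
     else if b3 then (⟨[("storage", s), ("input", i), ("audio", a), ("hubs", h), ("printers", p), ("other", o)]⟩ : PySem.Dict String (List (List (String × String)))).modify "audio" [] (· ++ [d])
     else if b4 then (⟨[("storage", s), ("input", i), ("audio", a), ("hubs", h), ("printers", p), ("other", o)]⟩ : PySem.Dict String (List (List (String × String)))).modify "hubs" [] (· ++ [d])
     else if b5 then (⟨[("storage", s), ("input", i), ("audio", a), ("hubs", h), ("printers", p), ("other", o)]⟩ : PySem.Dict String (List (List (String × String)))).modify "printers" [] (· ++ [d])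
     else (⟨[("storage", s), ("input", i), ("audio", a), ("hubs", h), ("printers", p), ("other", o)]⟩ : PySem.Dict String (List (List (String × String)))).modify "other" [] (· ++ [d])) =
      (let c : String := if b1 then "storage" else if b2 then "input" else if b3 then "audio"
                         else if b4 then "hubs" else if b5 then "printers" else "other"
       ⟨[("storage", if c == "storage" then s ++ [d] else s),
         ("input", if c == "input" then i ++ [d] else i),
         ("audio", if c == "audio" then a ++ [d] else a),
         ("hubs", if c == "hubs" then h ++ [d] else h),
         ("printers", if c == "printers" then p ++ [d] else p),
         ("other", if c == "other" then o ++ [d] else o)]⟩) := by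
  cases b1 <;> cases b2 <;> cases b3 <;> cases b4 <;> cases b5 <;>
    simp [PySem.Dict.modify, PySem.Dict.insert, PySem.Dict.getD, PySem.Dict.get?,
      PySem.Dict.contains]

-- one step of A's fold on the six-entry dict, described entrywise by B's classifier
theorem pvStep_eq (s i a h p o : List (List (String × String))) (d : List (String × String)) :
    pvAStep ⟨[("storage", s), ("input", i), ("audio", a), ("hubs", h), ("printers", p), ("other", o)]⟩ d =
      ⟨[("storage", if pvClassify d == "storage" then s ++ [d] else s),
        ("input", if pvClassify d == "input" then i ++ [d] else i),
        ("audio", if pvClassify d == "audio" then a ++ [d] else a),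
        ("hubs", if pvClassify d == "hubs" then h ++ [d] else h),
        ("printers", if pvClassify d == "printers" then p ++ [d] else p),
        ("other", if pvClassify d == "other" then o ++ [d] else o)]⟩ := by
  rw [pvClassify_eq]
  simp only [pvAStep]
  exact pvLadder _ _ _ _ _ s i a h p o d

-- fold invariant: folding A's step equals the six per-category filters
theorem pvFold_inv (devices : List (List (String × String)))
    (s i a h p o : List (List (String × String))) :
    (devices.foldl pvAStep
        ⟨[("storage", s), ("input", i), ("audio", a), ("hubs", h), ("printers", p), ("other", o)]⟩).items =
      [("storage", s ++ devices.filter (fun d => pvClassify d == "storage")),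
       ("input", i ++ devices.filter (fun d => pvClassify d == "input")),
       ("audio", a ++ devices.filter (fun d => pvClassify d == "audio")),
       ("hubs", h ++ devices.filter (fun d => pvClassify d == "hubs")),
       ("printers", p ++ devices.filter (fun d => pvClassify d == "printers")),
       ("other", o ++ devices.filter (fun d => pvClassify d == "other"))] := by
  induction devices generalizing s i a h p o with
  | nil => simp
  | cons d rest ih =>
    rw [List.foldl_cons, pvStep_eq, ih]
    simp only [List.filter_cons]
    split_ifs <;> simp

-- ===== VERDICT (by name: the statement is the Claim_ definition above) =====
theorem categorize_devices_py_spec : Claim_equal_categorize_devices_py := by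
  intro devices _
  show categorize_devices_py devices = categorize_devices_py_alt devices
  have hinit : (PySem.Dict.ofList
      ([("storage", []), ("input", []), ("audio", []), ("hubs", []), ("printers", []), ("other", [])] :
        List (String × List (List (String × String))))) =
      ⟨[("storage", []), ("input", []), ("audio", []), ("hubs", []), ("printers", []), ("other", [])]⟩ := by
    decide
  rw [categorize_devices_py, hinit, pvFold_inv]
  simp [categorize_devices_py_alt]
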